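-- pv_equiv track=rewrite | github.com/MaxwellChikalusa/School-Management-System | school-management-backend/crud.py | normalize_term
-- ===== SOURCE A (Python) =====
-- TERM_OPTIONS = ["Term 1", "Term 2", "Term 3"]
--
-- def normalize_spaces(value: str | None) -> str | None:
--     if value is None:
--         return None
--     cleaned = " ".join(value.strip().split())
--     return cleaned or None
--
-- def normalize_term(value: str | None) -> str | None:
--     cleaned = normalize_spaces(value)
--     if not cleaned:
--         return None
--     lowered = cleaned.casefold()
--     for option in TERM_OPTIONS:
--         if lowered == option.casefold():
--             return option
--     digits = "".join(character for character in lowered if character.isdigit())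
--     if digits in {"1", "2", "3"}:
--         return f"Term {digits}"
--     return cleaned.title()
-- ===== SOURCE B (Python) =====
-- def normalize_term(value):
--     if value is None:
--         return None
--     # single pass: collapse whitespace runs to one space, trimming the ends
--     out = []
--     pending = False
--     for ch in value:
--         if ch.isspace():
--             pending = bool(out)
--         else:
--             if pending:
--                 out.append(" ")
--                 pending = False
--             out.append(ch)
--     if not out:
--         return None
--     digits = [c for c in out if c.isdigit()]
--     if digits in (["1"], ["2"], ["3"]):
--         return "Term " + digits[0]
--     # single-pass title-casing
--     res = []
--     prev_alpha = False
--     for ch in out: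
--         if ch.isalpha():
--             res.append(ch.lower() if prev_alpha else ch.upper())
--             prev_alpha = True
--         else:
--             res.append(ch)
--             prev_alpha = False
--     return "".join(res)
-- ===== Notes on version B (the rewrite author's own statement) =====
-- stated objective: alternative
-- what changed: B replaces A's strip/split/join normalization with one fused whitespace-collapsing pass over the raw characters, drops the TERM_OPTIONS membership loop entirely (an exact option match always yields the same single digit), takes the digit characters from the cleaned string without casefolding it first, and title-cases in a single accumulator pass; it trades the staged library passes for explicit single-pass state machines of the same cost.
import Mathlib
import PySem

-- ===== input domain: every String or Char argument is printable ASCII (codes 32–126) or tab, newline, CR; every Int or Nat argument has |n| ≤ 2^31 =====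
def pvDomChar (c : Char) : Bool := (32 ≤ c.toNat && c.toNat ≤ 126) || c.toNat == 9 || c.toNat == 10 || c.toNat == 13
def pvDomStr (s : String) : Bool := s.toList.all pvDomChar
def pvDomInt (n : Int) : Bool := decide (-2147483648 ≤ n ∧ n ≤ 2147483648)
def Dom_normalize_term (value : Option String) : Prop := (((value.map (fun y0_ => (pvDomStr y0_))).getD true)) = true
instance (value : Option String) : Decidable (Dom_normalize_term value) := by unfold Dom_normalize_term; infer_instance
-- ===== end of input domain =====

-- B is an alternative single-pass formulation: one fused whitespace-collapsing pass replaces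
-- strip/split/join, the TERM_OPTIONS membership loop is dropped (an exact match always yields
-- the same single digit), and title-casing is a single accumulator pass; same return value everywhere.
-- str.title / str.casefold are ported by hand (exact on the ASCII domain: casefold = lower there;
-- title upper-cases a letter iff the previous character is not a letter).

-- ===== PORT A =====
-- Python's str.title over List Char (prev = previous char was alphabetic)
def pvTitle : List Char → Bool → List Char
  | [], _ => []
  | c :: rest, prev =>
    (if PySem.Chars.isalpha c then
        (if prev then PySem.Chars.lowerChar c else PySem.Chars.upperChar c)
      else c) :: pvTitle rest (PySem.Chars.isalpha c)

-- the 'for option in TERM_OPTIONS' loop, returning the first exact (casefolded) match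
def pvTermLoop (lowered : List Char) : List String → Option String
  | [] => none
  | o :: rest =>
    if lowered = PySem.Chars.lower o.toList then some o else pvTermLoop lowered rest

def normalize_term (value : Option String) : Option String :=
  match value with
  | none => none                                             -- normalize_spaces: None → None, then 'if not cleaned'
  | some s =>
    let cleaned := PySem.Chars.join [' '] (PySem.Chars.split₀ (PySem.Chars.strip s.toList))
    if cleaned = [] then none
    else
      let lowered := PySem.Chars.lower cleaned               -- casefold = lower on ASCII
      match pvTermLoop lowered ["Term 1", "Term 2", "Term 3"] with
      | some o => some o
      | none =>
        let digits := lowered.filter PySem.Chars.isdigit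
        if digits = ['1'] ∨ digits = ['2'] ∨ digits = ['3']  -- digits in {"1","2","3"}
        then some (String.ofList ("Term ".toList ++ digits))
        else some (String.ofList (pvTitle cleaned false))

-- ===== PORT B =====
-- one pass over the raw characters: collapse whitespace runs, trimming both ends
-- (out = collapsed prefix so far, pending = a separating space is owed)
def pvCollapse : List Char → List Char → Bool → List Char
  | [], out, _ => out
  | c :: rest, out, pending =>
    if PySem.Chars.isspace c then
      pvCollapse rest out (!out.isEmpty)
    else
      pvCollapse rest (out ++ (if pending then [' '] else []) ++ [c]) false

-- one pass title-casing with an explicit result accumulator (Python B's append loop)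
def pvTitleAcc : List Char → List Char → Bool → List Char
  | [], res, _ => res
  | c :: rest, res, prevAlpha =>
    if PySem.Chars.isalpha c then
      pvTitleAcc rest
        (res ++ [if prevAlpha then PySem.Chars.lowerChar c else PySem.Chars.upperChar c]) true
    else
      pvTitleAcc rest (res ++ [c]) false

def normalize_term_alt (value : Option String) : Option String :=
  match value with
  | none => none
  | some s =>
    let out := pvCollapse s.toList [] false
    if out.isEmpty then none
    else
      let digits := out.filter PySem.Chars.isdigit
      if digits = ['1'] ∨ digits = ['2'] ∨ digits = ['3']
      then some (String.ofList ("Term ".toList ++ digits))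
      else some (String.ofList (pvTitleAcc out [] false))

-- ===== PRECONDITION & SPEC =====
def Spec_normalize_term (value : Option String) (out : Option String) : Prop := out = normalize_term_alt value
instance (value : Option String) (out : Option String) : Decidable (Spec_normalize_term value out) := by unfold Spec_normalize_term; infer_instance

-- ===== CLAIM (what is proved, stated in full; the proofs are below) =====
def Claim_equal_normalize_term : Prop := ∀ (value : Option String), Dom_normalize_term value → Spec_normalize_term value (normalize_term value)

-- ===== LEMMAS AND PROOFS =====

-- the fused collapse pass computes join(' ', strip(s).split()) — proof via an invariant
-- relating pvCollapse's (out, pending) state to split₀.go's (cur, acc) state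
lemma join_append_single (xs : List (List Char)) (w : List Char) :
    PySem.Chars.join [' '] (xs ++ [w]) = PySem.Chars.join [' '] xs ++ (if xs = [] then w else ' ' :: w) := by
  induction xs with
  | nil => simp [PySem.Chars.join, List.intercalate]
  | cons x xs ih =>
    cases xs with
    | nil => simp [PySem.Chars.join, List.intercalate, List.intersperse]
    | cons y ys =>
      simp only [PySem.Chars.join, List.intercalate] at *
      simp only [List.cons_append, List.intersperse_cons₂, List.flatten_cons] at *
      simp [ih]

-- join of a list of nonempty words is empty iff the list is empty
lemma join_eq_nil_iff (xs : List (List Char)) (h : ∀ w ∈ xs, w ≠ []) :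
    PySem.Chars.join [' '] xs = [] ↔ xs = [] := by
  cases xs with
  | nil => simp [PySem.Chars.join, List.intercalate]
  | cons x t =>
    rcases List.eq_nil_or_concat t with rfl | ⟨u, w, rfl⟩
    · simp [PySem.Chars.join, List.intercalate, List.intersperse]
      exact h x (by simp)
    · rw [List.concat_eq_append, show x :: (u ++ [w]) = (x :: u) ++ [w] from rfl, join_append_single]
      simp

lemma go_nil (cur : List Char) (acc : List (List Char)) :
    PySem.Chars.split₀.go [] cur acc =
      if cur.isEmpty then acc.reverse else (cur.reverse :: acc).reverse := by
  rw [PySem.Chars.split₀.go]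

lemma go_cons (c : Char) (rest cur : List Char) (acc : List (List Char)) :
    PySem.Chars.split₀.go (c :: rest) cur acc =
      if PySem.Chars.isspace c then
        (if cur.isEmpty then PySem.Chars.split₀.go rest [] acc
         else PySem.Chars.split₀.go rest [] (cur.reverse :: acc))
      else PySem.Chars.split₀.go rest (c :: cur) acc := by
  rw [PySem.Chars.split₀.go]

-- trailing whitespace only flushes the current word
lemma go_spaces (u : List Char) (hu : ∀ c ∈ u, PySem.Chars.isspace c = true) (cur : List Char) (acc : List (List Char)) :
    PySem.Chars.split₀.go u cur acc = PySem.Chars.split₀.go [] cur acc := by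
  induction u generalizing cur acc with
  | nil => rfl
  | cons c rest ih =>
    rw [go_cons, if_pos (hu c (by simp))]
    by_cases hc : cur.isEmpty
    · rw [if_pos hc, ih (fun d hd => hu d (by simp [hd])), go_nil, go_nil]; simp [hc]
    · rw [if_neg hc, ih (fun d hd => hu d (by simp [hd])), go_nil, go_nil]; simp [hc]

lemma go_append_spaces (t u : List Char) (hu : ∀ c ∈ u, PySem.Chars.isspace c = true)
    (cur : List Char) (acc : List (List Char)) :
    PySem.Chars.split₀.go (t ++ u) cur acc = PySem.Chars.split₀.go t cur acc := by
  induction t generalizing cur acc with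
  | nil => simpa using go_spaces u hu cur acc
  | cons c rest ih =>
    rw [List.cons_append, go_cons, go_cons]
    by_cases hs : PySem.Chars.isspace c
    · rw [if_pos hs, if_pos hs]
      by_cases hc : cur.isEmpty
      · rw [if_pos hc, if_pos hc, ih]
      · rw [if_neg hc, if_neg hc, ih]
    · rw [if_neg hs, if_neg hs, ih]

lemma go_dropWhile (s : List Char) (acc : List (List Char)) :
    PySem.Chars.split₀.go (List.dropWhile PySem.Chars.isspace s) [] acc = PySem.Chars.split₀.go s [] acc := by
  induction s with
  | nil => rfl
  | cons c rest ih =>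
    by_cases hs : PySem.Chars.isspace c
    · rw [List.dropWhile_cons_of_pos hs, ih, go_cons, if_pos hs]; simp
    · rw [List.dropWhile_cons_of_neg (by simp [hs])]

lemma split₀_strip (s : List Char) :
    PySem.Chars.split₀ (PySem.Chars.strip s) = PySem.Chars.split₀ s := by
  unfold PySem.Chars.split₀ PySem.Chars.strip PySem.Chars.rstrip PySem.Chars.lstrip
  have hdecomp : List.dropWhile PySem.Chars.isspace s =
      (List.dropWhile PySem.Chars.isspace (List.dropWhile PySem.Chars.isspace s).reverse).reverse
        ++ (List.takeWhile PySem.Chars.isspace (List.dropWhile PySem.Chars.isspace s).reverse).reverse := by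
    rw [← List.reverse_append, List.takeWhile_append_dropWhile, List.reverse_reverse]
  calc PySem.Chars.split₀.go (List.dropWhile PySem.Chars.isspace (List.dropWhile PySem.Chars.isspace s).reverse).reverse [] []
      = PySem.Chars.split₀.go (List.dropWhile PySem.Chars.isspace s) [] [] := by
        conv_rhs => rw [hdecomp]
        rw [go_append_spaces]
        intro c hc
        exact List.mem_takeWhile_imp (List.mem_reverse.mp hc)
    _ = PySem.Chars.split₀.go s [] [] := go_dropWhile s []


def pvJ : List Char → List (List Char) → List Char
  | [], acc => PySem.Chars.join [' '] acc.reverse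
  | c :: cs, acc => PySem.Chars.join [' '] (acc.reverse ++ [(c :: cs).reverse])

lemma pvJ_nil_isEmpty (acc : List (List Char)) (hacc : ∀ w ∈ acc, w ≠ []) :
    (pvJ [] acc).isEmpty = acc.isEmpty := by
  show (PySem.Chars.join [' '] acc.reverse).isEmpty = acc.isEmpty
  rw [Bool.eq_iff_iff]
  simp only [List.isEmpty_iff]
  rw [join_eq_nil_iff _ (by simpa using hacc)]
  simp

lemma pvJ_cons_isEmpty (c : Char) (cs : List Char) (acc : List (List Char)) :
    (pvJ (c :: cs) acc).isEmpty = false := by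
  show (PySem.Chars.join [' '] (acc.reverse ++ [(c :: cs).reverse])).isEmpty = false
  rw [join_append_single]
  simp only [List.isEmpty_eq_false_iff, ne_eq]
  intro hjoin
  rcases List.append_eq_nil_iff.mp hjoin with ⟨-, h2⟩
  split_ifs at h2; simp_all

lemma collapse_invariant (s cur : List Char) (acc : List (List Char)) (hacc : ∀ w ∈ acc, w ≠ []) :
    pvCollapse s (pvJ cur acc) (cur.isEmpty && !acc.isEmpty) =
      PySem.Chars.join [' '] (PySem.Chars.split₀.go s cur acc) := by
  induction s generalizing cur acc with
  | nil => rw [go_nil]; cases cur <;> simp [pvCollapse, pvJ]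
  | cons c rest ih =>
    rw [go_cons]
    by_cases hs : PySem.Chars.isspace c
    · rw [if_pos hs]
      rw [show pvCollapse (c :: rest) (pvJ cur acc) (cur.isEmpty && !acc.isEmpty)
            = pvCollapse rest (pvJ cur acc) (!(pvJ cur acc).isEmpty) from by
        rw [pvCollapse, if_pos hs]]
      cases cur with
      | nil =>
        rw [if_pos (by simp : (([]:List Char)).isEmpty = true), pvJ_nil_isEmpty acc hacc]
        simpa using ih [] acc hacc
      | cons d ds =>
        rw [if_neg (by simp), pvJ_cons_isEmpty]
        have hacc' : ∀ w ∈ (d :: ds).reverse :: acc, w ≠ [] := by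
          intro w hw
          rcases List.mem_cons.mp hw with rfl | hw2
          · simp
          · exact hacc w hw2
        have h2 := ih [] ((d :: ds).reverse :: acc) hacc'
        have hJ : pvJ [] ((d :: ds).reverse :: acc) = pvJ (d :: ds) acc := by
          show PySem.Chars.join [' '] (((d :: ds).reverse :: acc).reverse) = _
          simp [pvJ]
        rw [hJ] at h2
        simpa using h2
    · rw [if_neg hs]
      rw [show pvCollapse (c :: rest) (pvJ cur acc) (cur.isEmpty && !acc.isEmpty)
            = pvCollapse rest
                (pvJ cur acc ++ (if (cur.isEmpty && !acc.isEmpty) = true then [' '] else []) ++ [c])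
                false from by
        rw [pvCollapse, if_neg hs]]
      have h2 := ih (c :: cur) acc hacc
      have hJ : pvJ cur acc ++ (if (cur.isEmpty && !acc.isEmpty) = true then [' '] else []) ++ [c]
          = pvJ (c :: cur) acc := by
        cases cur with
        | nil =>
          show PySem.Chars.join [' '] acc.reverse ++ _ ++ [c]
              = PySem.Chars.join [' '] (acc.reverse ++ [[c]])
          rw [join_append_single]
          by_cases ha : acc = []
          · subst ha; simp [PySem.Chars.join, List.intercalate]
          · rw [if_neg (by simpa using ha : ¬ acc.reverse = [])]
            simp [ha]
        | cons d ds =>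
          show PySem.Chars.join [' '] (acc.reverse ++ [(d :: ds).reverse]) ++ _ ++ [c]
              = PySem.Chars.join [' '] (acc.reverse ++ [(c :: d :: ds).reverse])
          simp only [join_append_single, List.isEmpty_cons, Bool.false_and, Bool.false_eq_true,
            if_false, List.append_nil, List.reverse_cons]
          split_ifs <;> simp
      rw [hJ]
      simpa using h2

lemma collapse_eq_clean (s : List Char) :
    pvCollapse s [] false = PySem.Chars.join [' '] (PySem.Chars.split₀ (PySem.Chars.strip s)) := by
  rw [split₀_strip]
  have h := collapse_invariant s [] [] (by simp)
  simpa [pvJ, PySem.Chars.join, List.intercalate] using h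

lemma upper_bounds (c : Char) (h : PySem.Chars.isupper c = true) :
    65 ≤ c.toNat ∧ c.toNat ≤ 90 := by
  simp only [PySem.Chars.isupper, Bool.and_eq_true, decide_eq_true_eq, Char.le_def,
    UInt32.le_iff_toNat_le] at h
  exact h

lemma lowerChar_toNat_of_isupper (c : Char) (h : PySem.Chars.isupper c = true) :
    (PySem.Chars.lowerChar c).toNat = c.toNat + 32 := by
  have hb := upper_bounds c h
  simp only [PySem.Chars.lowerChar, h, if_pos, Char.toNat_ofNat]
  rw [if_pos]
  constructor; omega

lemma isdigit_iff_toNat (c : Char) :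
    PySem.Chars.isdigit c = true ↔ (48 ≤ c.toNat ∧ c.toNat ≤ 57) := by
  simp only [PySem.Chars.isdigit, Bool.and_eq_true, decide_eq_true_eq, Char.le_def,
    UInt32.le_iff_toNat_le]
  constructor <;> exact fun h => h

lemma isdigit_lowerChar (c : Char) :
    PySem.Chars.isdigit (PySem.Chars.lowerChar c) = PySem.Chars.isdigit c := by
  by_cases h : PySem.Chars.isupper c = true
  · have hb := upper_bounds c h
    have h2 := lowerChar_toNat_of_isupper c h
    rw [Bool.eq_iff_iff, isdigit_iff_toNat, isdigit_iff_toNat, h2]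
    omega
  · simp [PySem.Chars.lowerChar, h]

lemma lowerChar_of_isdigit (c : Char) (h : PySem.Chars.isdigit c = true) :
    PySem.Chars.lowerChar c = c := by
  have hd := (isdigit_iff_toNat c).mp h
  have hu : ¬ PySem.Chars.isupper c = true := by
    intro hup
    have := upper_bounds c hup
    omega
  simp [PySem.Chars.lowerChar, hu]

-- casefolding changes no digit and creates none: the digit strings of cleaned and lowered agree
lemma filter_isdigit_lower (s : List Char) :
    (PySem.Chars.lower s).filter PySem.Chars.isdigit = s.filter PySem.Chars.isdigit := by
  unfold PySem.Chars.lower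
  induction s with
  | nil => rfl
  | cons c rest ih =>
    simp only [List.map_cons, List.filter_cons, isdigit_lowerChar]
    by_cases h : PySem.Chars.isdigit c = true
    · rw [h, lowerChar_of_isdigit c h]
      simpa using ih
    · simp only [Bool.not_eq_true] at h
      rw [h]
      simpa using ih

lemma titleAcc_eq (s res : List Char) (prev : Bool) :
    pvTitleAcc s res prev = res ++ pvTitle s prev := by
  induction s generalizing res prev with
  | nil => simp [pvTitleAcc, pvTitle]
  | cons c rest ih =>
    by_cases h : PySem.Chars.isalpha c
    · simp [pvTitleAcc, pvTitle, h, ih]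
    · simp [pvTitleAcc, pvTitle, h, ih]

-- after the empty guard, A's loop-then-digits tail equals B's digits-only tail
lemma tail_eq (cleaned : List Char) :
    (match pvTermLoop (PySem.Chars.lower cleaned) ["Term 1", "Term 2", "Term 3"] with
     | some o => some o
     | none =>
        let digits := (PySem.Chars.lower cleaned).filter PySem.Chars.isdigit
        if digits = ['1'] ∨ digits = ['2'] ∨ digits = ['3']
        then some (String.ofList ("Term ".toList ++ digits))
        else some (String.ofList (pvTitle cleaned false)))
    =
    (let digits := (PySem.Chars.lower cleaned).filter PySem.Chars.isdigit
     if digits = ['1'] ∨ digits = ['2'] ∨ digits = ['3']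
     then some (String.ofList ("Term ".toList ++ digits))
     else some (String.ofList (pvTitle cleaned false))) := by
  by_cases h1 : PySem.Chars.lower cleaned = "term 1".toList
  · rw [h1, show pvTermLoop "term 1".toList ["Term 1", "Term 2", "Term 3"] = some "Term 1" from by decide]
    rw [if_pos (by decide)]; decide
  · by_cases h2 : PySem.Chars.lower cleaned = "term 2".toList
    · rw [h2, show pvTermLoop "term 2".toList ["Term 1", "Term 2", "Term 3"] = some "Term 2" from by decide]
      rw [if_pos (by decide)]; decide
    · by_cases h3 : PySem.Chars.lower cleaned = "term 3".toList
      · rw [h3, show pvTermLoop "term 3".toList ["Term 1", "Term 2", "Term 3"] = some "Term 3" from by decide]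
        rw [if_pos (by decide)]; decide
      · have : pvTermLoop (PySem.Chars.lower cleaned) ["Term 1", "Term 2", "Term 3"] = none := by
          simp only [pvTermLoop]
          rw [if_neg, if_neg, if_neg] <;> first
            | exact fun h => h3 (by simpa using h)
            | exact fun h => h2 (by simpa using h)
            | exact fun h => h1 (by simpa using h)
        rw [this]

-- ===== VERDICT (by name: the statement is the Claim_ definition above) =====
theorem normalize_term_spec : Claim_equal_normalize_term := by
  intro value _
  unfold Spec_normalize_term normalize_term normalize_term_alt
  cases value with
  | none => rfl
  | some s =>
    simp only [← collapse_eq_clean]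
    generalize pvCollapse s.toList [] false = L
    by_cases hc : L = []
    · simp [hc]
    · have hb : L.isEmpty = false := by simpa using hc
      rw [if_neg hc, hb, if_neg (by simp : ¬(false = true)), tail_eq, filter_isdigit_lower, titleAcc_eq]
      simp
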